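-- pv_equiv track=rewrite | github.com/sanjivakyosan/PRHP-Political-Hierarchy-Pruner-Qubit-Ready-Ethical-Emergence | src/governance_engine.py | assess_nist_risk_level
-- ===== SOURCE A (Python) =====
-- def assess_nist_risk_level(failure_modes: list) -> str:
--     """
--     Assess NIST risk level based on detected failure modes.
--
--     Args:
--         failure_modes: List of failure mode identifiers
--
--     Returns:
--         Risk level: "Green", "Yellow", or "Red"
--     """
--     if not failure_modes:
--         return "Green"
--
--     # Critical failure modes that indicate Red risk
--     critical_modes = ["cascading_risk", "high_risk_mental_health"]
--
--     # High-risk failure modes that indicate Yellow risk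
--     high_risk_modes = ["equity_bias", "data_provenance"]
--
--     # Check for critical modes
--     if any(mode in critical_modes for mode in failure_modes):
--         return "Red"
--
--     # Check for high-risk modes
--     if any(mode in high_risk_modes for mode in failure_modes):
--         return "Yellow"
--
--     # Other modes indicate Green (monitored but not critical)
--     return "Green"
-- ===== SOURCE B (Python) =====
-- _SEVERITY = {
--     "cascading_risk": 2,
--     "high_risk_mental_health": 2,
--     "equity_bias": 1,
--     "data_provenance": 1,
-- }
--
-- def assess_nist_risk_level(failure_modes: list) -> str:
--     rank = 0
--     for mode in failure_modes:
--         rank = max(rank, _SEVERITY.get(mode, 0))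
--     return "Red" if rank == 2 else "Yellow" if rank == 1 else "Green"
-- ===== Notes on version B (the rewrite author's own statement) =====
-- stated objective: alternative
-- what changed: Replaces the two ordered short-circuit any()-membership scans with a single max-reduction over a severity map (mode -> 2/1/0) followed by a rank-to-label mapping.
import Mathlib
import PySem

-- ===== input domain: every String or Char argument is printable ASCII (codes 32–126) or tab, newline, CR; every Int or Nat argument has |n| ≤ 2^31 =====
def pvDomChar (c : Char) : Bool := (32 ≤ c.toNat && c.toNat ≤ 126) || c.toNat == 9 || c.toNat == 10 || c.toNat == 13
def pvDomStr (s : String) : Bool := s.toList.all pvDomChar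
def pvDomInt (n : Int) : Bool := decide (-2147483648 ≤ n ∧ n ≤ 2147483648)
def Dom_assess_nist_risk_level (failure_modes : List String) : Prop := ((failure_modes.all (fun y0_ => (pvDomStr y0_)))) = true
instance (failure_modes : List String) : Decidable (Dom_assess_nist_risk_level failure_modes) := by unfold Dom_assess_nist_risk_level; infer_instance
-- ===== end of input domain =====

-- B replaces A's two ordered any()-membership scans by one max-severity reduction plus a
-- rank-to-label mapping; same result on every input (objective: alternative decomposition).

-- ===== PORT A =====
def assess_nist_risk_level (failure_modes : List String) : String :=
  if failure_modes = [] then "Green"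
  else
    let critical_modes : List String := ["cascading_risk", "high_risk_mental_health"]
    let high_risk_modes : List String := ["equity_bias", "data_provenance"]
    if failure_modes.any (fun mode => critical_modes.contains mode) then "Red"
    else if failure_modes.any (fun mode => high_risk_modes.contains mode) then "Yellow"
    else "Green"

-- ===== PORT B =====
def pvSeverity : PySem.Dict String Int :=
  PySem.Dict.ofList [("cascading_risk", 2), ("high_risk_mental_health", 2),
                     ("equity_bias", 1), ("data_provenance", 1)]

def assess_nist_risk_level_alt (failure_modes : List String) : String :=
  let rank := failure_modes.foldl (fun r mode => max r (PySem.Dict.getD pvSeverity mode 0)) 0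
  if rank = 2 then "Red" else if rank = 1 then "Yellow" else "Green"

-- ===== PRECONDITION & SPEC =====
def Spec_assess_nist_risk_level (failure_modes : List String) (out : String) : Prop := out = assess_nist_risk_level_alt failure_modes
instance (failure_modes : List String) (out : String) : Decidable (Spec_assess_nist_risk_level failure_modes out) := by unfold Spec_assess_nist_risk_level; infer_instance

-- ===== CLAIM (what is proved, stated in full; the proofs are below) =====
def Claim_equal_assess_nist_risk_level : Prop := ∀ (failure_modes : List String), Dom_assess_nist_risk_level failure_modes → Spec_assess_nist_risk_level failure_modes (assess_nist_risk_level failure_modes)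

-- ===== LEMMAS AND PROOFS =====

-- the maximum severity of a list, phrased as A's if-chain
def pvMaxSev (fm : List String) : Int :=
  if fm.any (fun m => (["cascading_risk", "high_risk_mental_health"] : List String).contains m) then 2
  else if fm.any (fun m => (["equity_bias", "data_provenance"] : List String).contains m) then 1
  else 0

theorem pvSev_cases (m : String) :
    PySem.Dict.getD pvSeverity m 0 =
      if (["cascading_risk", "high_risk_mental_health"] : List String).contains m then 2
      else if (["equity_bias", "data_provenance"] : List String).contains m then 1
      else 0 := by
  have hmk : pvSeverity = PySem.Dict.mk [("cascading_risk", 2), ("high_risk_mental_health", 2),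
      ("equity_bias", 1), ("data_provenance", 1)] := by decide
  rw [hmk]
  by_cases h1 : "cascading_risk" = m <;> by_cases h2 : "high_risk_mental_health" = m <;>
    by_cases h3 : "equity_bias" = m <;> by_cases h4 : "data_provenance" = m <;>
    simp [PySem.Dict.getD, PySem.Dict.get?_mk_cons, h1, h2, h3, h4] <;>
    first | rfl | exact ⟨fun h => h1 h.symm, fun h => h2 h.symm⟩ |
      (simp [PySem.Dict.get?];
       rw [if_neg (by rintro (h | h) <;> [exact h1 h.symm; exact h2 h.symm]),
           if_neg (by rintro (h | h) <;> [exact h3 h.symm; exact h4 h.symm])])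
theorem pvMaxSev_cons (m : String) (fm : List String) :
    pvMaxSev (m :: fm) = max (PySem.Dict.getD pvSeverity m 0) (pvMaxSev fm) := by
  rw [pvSev_cases]
  unfold pvMaxSev
  by_cases h1 : (["cascading_risk", "high_risk_mental_health"] : List String).contains m <;>
    by_cases h2 : (["equity_bias", "data_provenance"] : List String).contains m <;>
    simp_all [List.any_cons, max_def] <;> first | omega | aesop

theorem pvMaxSev_nonneg (fm : List String) : 0 ≤ pvMaxSev fm := by
  unfold pvMaxSev; split_ifs <;> omega

theorem pvFold_eq (fm : List String) :
    ∀ r : Int, 0 ≤ r →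
      fm.foldl (fun r mode => max r (PySem.Dict.getD pvSeverity mode 0)) r = max r (pvMaxSev fm) := by
  induction fm with
  | nil => intro r hr; simp [pvMaxSev]; omega
  | cons m fm ih =>
      intro r hr
      simp only [List.foldl_cons]
      rw [ih _ (le_trans hr (le_max_left _ _)), pvMaxSev_cons]
      have := pvMaxSev_nonneg fm
      simp [max_def]; split_ifs <;> omega

-- ===== VERDICT (by name: the statement is the Claim_ definition above) =====
theorem assess_nist_risk_level_spec : Claim_equal_assess_nist_risk_level := by
  intro fm _
  show assess_nist_risk_level fm = assess_nist_risk_level_alt fm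
  unfold assess_nist_risk_level assess_nist_risk_level_alt
  rw [pvFold_eq fm 0 le_rfl]
  have h0 := pvMaxSev_nonneg fm
  have hmax : max (0 : Int) (pvMaxSev fm) = pvMaxSev fm := by omega
  rw [hmax]
  rcases fm with _ | ⟨m, fm'⟩
  · simp [pvMaxSev]
  · simp only [pvMaxSev]
    split_ifs <;> simp_all
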